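-- pv_equiv track=rewrite | github.com/729149195/DataDiagnosticPlatform | RunDetectAlgorithm/algorithm/AXUV/error_axuv_saturation.py | func
-- ===== SOURCE A (Python) =====
-- def func(arr):
--     ranges = []
--     threshold = 10
--     start = None  # 开始位置的索引
--     i = 0
--     while i < len(arr):
--         if arr[i] > threshold:
--             i += 1
--             start = i
--             while i < len(arr) and arr[i] > 10:
--                 i += 1
--             if i - start > 1:
--                 ranges.append([start, i-1])
--         i += 1
--
--     return ranges
-- ===== SOURCE B (Python) =====
-- def func(arr):
--     # Pass 1: collect maximal runs of consecutive values > 10 as (start, end) index pairs.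
--     runs = []
--     s = None
--     for i, v in enumerate(arr):
--         if v > 10:
--             if s is None:
--                 s = i
--         else:
--             if s is not None:
--                 runs.append((s, i - 1))
--                 s = None
--     if s is not None:
--         runs.append((s, len(arr) - 1))
--     # Pass 2: keep runs of length >= 3, reported as [start+1, end].
--     return [[s + 1, e] for (s, e) in runs if e - s + 1 >= 3]
-- ===== Notes on version B (the rewrite author's own statement) =====
-- stated objective: idiomatic
-- what changed: Replaces A's interleaved nested-while index juggling with a single enumerate pass that collects maximal (start,end) runs of values > 10, followed by a separate filter/map over the runs list.
import Mathlib
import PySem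

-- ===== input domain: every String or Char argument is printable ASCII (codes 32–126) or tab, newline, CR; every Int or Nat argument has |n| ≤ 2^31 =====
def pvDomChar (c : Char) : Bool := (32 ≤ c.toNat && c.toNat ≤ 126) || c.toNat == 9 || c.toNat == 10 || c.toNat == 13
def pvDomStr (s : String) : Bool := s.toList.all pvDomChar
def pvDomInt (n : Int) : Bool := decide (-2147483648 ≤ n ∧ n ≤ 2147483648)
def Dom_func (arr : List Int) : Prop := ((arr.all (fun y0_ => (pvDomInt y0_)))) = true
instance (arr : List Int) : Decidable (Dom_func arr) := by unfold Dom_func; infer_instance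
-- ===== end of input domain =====

-- B replaces A's interleaved nested-while index juggling with one enumerate pass collecting
-- maximal runs, then a separate filter/map over the runs list (idiomatic; same O(n) cost).

-- ===== PORT A =====
-- inner 'while i < len(arr) and arr[i] > 10: i += 1'
def funcInner (arr : List Int) (i : Nat) : Nat :=
  if h : i < arr.length ∧ arr.getD i 0 > 10 then funcInner arr (i + 1) else i
termination_by arr.length - i
decreasing_by omega

-- outer while loop; i strictly increases each iteration, so fuel = arr.length suffices
def funcGo (arr : List Int) (fuel : Nat) (i : Nat) (ranges : List (List Int)) :
    List (List Int) :=
  match fuel with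
  | 0 => ranges
  | fuel + 1 =>
    if i < arr.length then
      if arr.getD i 0 > 10 then
        let start := i + 1
        let j := funcInner arr start
        let ranges' :=
          if j - start > 1 then ranges ++ [[(start : Int), (j : Int) - 1]] else ranges
        funcGo arr fuel (j + 1) ranges'
      else funcGo arr fuel (i + 1) ranges
    else ranges

def func (arr : List Int) : List (List Int) := funcGo arr arr.length 0 []

-- ===== PORT B =====
-- enumerate(arr) starting at index n
def enumFrom (n : Nat) : List Int → List (Nat × Int)
  | [] => []
  | v :: t => (n, v) :: enumFrom (n + 1) t

-- body of B's for loop: state = (runs, current run start or none)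
def bStep (st : List (Nat × Nat) × Option Nat) (p : Nat × Int) :
    List (Nat × Nat) × Option Nat :=
  if p.2 > 10 then
    match st.2 with
    | none => (st.1, some p.1)
    | some s0 => (st.1, some s0)
  else
    match st.2 with
    | none => (st.1, none)
    | some s0 => (st.1 ++ [(s0, p.1 - 1)], none)

def func_alt (arr : List Int) : List (List Int) :=
  let st := (enumFrom 0 arr).foldl bStep ([], none)
  let runs :=
    match st.2 with
    | none => st.1
    | some s0 => st.1 ++ [(s0, arr.length - 1)]
  (runs.filter (fun p => p.2 - p.1 + 1 ≥ 3)).map (fun p => [(p.1 : Int) + 1, (p.2 : Int)])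

-- ===== PRECONDITION & SPEC =====
def Spec_func (arr : List Int) (out : List (List Int)) : Prop := out = func_alt arr
instance (arr : List Int) (out : List (List Int)) : Decidable (Spec_func arr out) := by unfold Spec_func; infer_instance

-- ===== CLAIM (what is proved, stated in full; the proofs are below) =====
def Claim_equal_func : Prop := ∀ (arr : List Int), Dom_func arr → Spec_func arr (func arr)

-- ===== LEMMAS AND PROOFS =====

-- length of the leading run of values > 10
def runLen : List Int → Nat
  | [] => 0
  | v :: t => if v > 10 then runLen t + 1 else 0

-- reference: the maximal runs of values > 10, as (start, end) pairs, indices from n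
def rawRuns : List Int → Nat → List (Nat × Nat)
  | [], _ => []
  | v :: t, n =>
    if v > 10 then
      (n, n + runLen (v :: t) - 1) ::
        rawRuns (List.drop (runLen (v :: t) - 1) t) (n + runLen (v :: t))
    else rawRuns t (n + 1)
termination_by l _ => l.length
decreasing_by all_goals (simp only [List.length_drop, List.length_cons]; omega)

def conv (rs : List (Nat × Nat)) : List (List Int) :=
  (rs.filter (fun p => p.2 - p.1 + 1 ≥ 3)).map (fun p => [(p.1 : Int) + 1, (p.2 : Int)])

lemma runLen_cons_pos {v : Int} (t : List Int) (h : v > 10) :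
    runLen (v :: t) = runLen t + 1 := by simp [runLen, h]

lemma runLen_cons_neg {v : Int} (t : List Int) (h : ¬ v > 10) :
    runLen (v :: t) = 0 := by simp [runLen, h]

lemma rawRuns_nil (n : Nat) : rawRuns [] n = [] := by rw [rawRuns]

lemma rawRuns_cons_neg {v : Int} (t : List Int) (n : Nat) (h : ¬ v > 10) :
    rawRuns (v :: t) n = rawRuns t (n + 1) := by
  rw [rawRuns]; simp [h]

-- the element right after the leading run, if any, is ≤ 10
lemma runLen_drop_head : ∀ (l : List Int) (v : Int) (t : List Int),
    List.drop (runLen l) l = v :: t → ¬ v > 10 := by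
  intro l
  induction l with
  | nil => intro v t h; simp at h
  | cons w l' ih =>
    intro v t h
    by_cases hw : w > 10
    · rw [runLen_cons_pos _ hw] at h
      simp only [List.drop_succ_cons] at h
      exact ih v t h
    · rw [runLen_cons_neg _ hw] at h
      simp only [List.drop_zero] at h
      cases h; exact hw

lemma funcInner_eq (arr : List Int) : ∀ s, funcInner arr s = s + runLen (List.drop s arr) := by
  intro s
  induction hn : arr.length - s using Nat.strong_induction_on generalizing s with
  | _ n ih =>
    rw [funcInner]
    by_cases h : s < arr.length ∧ arr.getD s 0 > 10
    · rw [dif_pos h]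
      have hdrop : List.drop s arr = arr[s] :: List.drop (s + 1) arr :=
        List.drop_eq_getElem_cons h.1
      have hget : arr.getD s 0 = arr[s] := List.getD_eq_getElem arr 0 h.1
      have h2 : arr[s] > 10 := by have := h.2; rwa [hget] at this
      rw [ih (arr.length - (s + 1)) (by omega) (s + 1) rfl, hdrop, runLen_cons_pos _ h2]
      omega
    · rw [dif_neg h]
      rcases Nat.lt_or_ge s arr.length with hs | hs
      · have hdrop : List.drop s arr = arr[s] :: List.drop (s + 1) arr :=
          List.drop_eq_getElem_cons hs
        have hget : arr.getD s 0 = arr[s] := List.getD_eq_getElem arr 0 hs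
        have hng : ¬ arr.getD s 0 > 10 := fun hg => h ⟨hs, hg⟩
        rw [hdrop, runLen_cons_neg]
        · omega
        · rwa [hget] at hng
      · rw [List.drop_eq_nil_of_le hs]; simp [runLen]

lemma conv_cons (p : Nat × Nat) (rs : List (Nat × Nat)) :
    conv (p :: rs) = (if p.2 - p.1 + 1 ≥ 3 then [[(p.1 : Int) + 1, (p.2 : Int)]] else []) ++ conv rs := by
  by_cases h : p.2 - p.1 + 1 ≥ 3
  · have h' : 2 ≤ p.2 - p.1 := by omega
    simp [conv, h, h']
  · have h' : ¬ 2 ≤ p.2 - p.1 := by omega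
    simp [conv, h, h']

-- skipping a non-run position does not change the runs
lemma rawRuns_skip (arr : List Int) (i : Nat)
    (h : arr.length ≤ i ∨ ¬ arr.getD i 0 > 10) :
    rawRuns (List.drop i arr) i = rawRuns (List.drop (i + 1) arr) (i + 1) := by
  rcases h with h | h
  · rw [List.drop_eq_nil_of_le h, List.drop_eq_nil_of_le (by omega), rawRuns_nil, rawRuns_nil]
  · rcases Nat.lt_or_ge i arr.length with hi | hi
    · have hdrop : List.drop i arr = arr[i] :: List.drop (i + 1) arr :=
        List.drop_eq_getElem_cons hi
      have hget : arr.getD i 0 = arr[i] := List.getD_eq_getElem arr 0 hi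
      rw [hdrop, rawRuns_cons_neg _ _ (by rwa [hget] at h)]
    · rw [List.drop_eq_nil_of_le hi, List.drop_eq_nil_of_le (by omega), rawRuns_nil, rawRuns_nil]

lemma funcGo_eq (arr : List Int) : ∀ (fuel i : Nat) (ranges : List (List Int)),
    arr.length ≤ i + fuel →
    funcGo arr fuel i ranges = ranges ++ conv (rawRuns (List.drop i arr) i) := by
  intro fuel
  induction fuel with
  | zero =>
    intro i ranges hf
    rw [funcGo, List.drop_eq_nil_of_le (by omega), rawRuns_nil]
    simp [conv]
  | succ fuel ih =>
    intro i ranges hf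
    rw [funcGo]
    by_cases hi : i < arr.length
    · rw [if_pos hi]
      by_cases hv : arr.getD i 0 > 10
      · rw [if_pos hv]
        have hdrop : List.drop i arr = arr[i] :: List.drop (i + 1) arr :=
          List.drop_eq_getElem_cons hi
        have hget : arr.getD i 0 = arr[i] := List.getD_eq_getElem arr 0 hi
        have hv' : arr[i] > 10 := by rwa [hget] at hv
        have hrl : runLen (List.drop i arr) = runLen (List.drop (i + 1) arr) + 1 := by
          rw [hdrop, runLen_cons_pos _ hv']
        have hj : funcInner arr (i + 1) = i + 1 + runLen (List.drop (i + 1) arr) :=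
          funcInner_eq arr (i + 1)
        have hraw : rawRuns (List.drop i arr) i
            = (i, i + runLen (List.drop (i + 1) arr)) ::
              rawRuns (List.drop (i + 1 + runLen (List.drop (i + 1) arr)) arr)
                (i + 1 + runLen (List.drop (i + 1) arr)) := by
          rw [hdrop, rawRuns, if_pos hv', runLen_cons_pos _ hv', Nat.add_sub_cancel,
            List.drop_drop,
            show i + (runLen (List.drop (i + 1) arr) + 1) - 1
              = i + runLen (List.drop (i + 1) arr) by omega,
            show i + (runLen (List.drop (i + 1) arr) + 1)
              = i + 1 + runLen (List.drop (i + 1) arr) by omega]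
        have hskip : rawRuns (List.drop (i + 1 + runLen (List.drop (i + 1) arr)) arr)
              (i + 1 + runLen (List.drop (i + 1) arr))
            = rawRuns (List.drop (i + 1 + runLen (List.drop (i + 1) arr) + 1) arr)
              (i + 1 + runLen (List.drop (i + 1) arr) + 1) := by
          apply rawRuns_skip
          rcases Nat.lt_or_ge (i + 1 + runLen (List.drop (i + 1) arr)) arr.length with hm | hm
          · right
            have hcons := List.drop_eq_getElem_cons hm
            have hdd : List.drop (runLen (List.drop i arr)) (List.drop i arr)
                = arr[i + 1 + runLen (List.drop (i + 1) arr)] ::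
                  List.drop (i + 1 + runLen (List.drop (i + 1) arr) + 1) arr := by
              rw [hrl, List.drop_drop,
                show i + (runLen (List.drop (i + 1) arr) + 1)
                  = i + 1 + runLen (List.drop (i + 1) arr) by omega, hcons]
            have hng := runLen_drop_head (List.drop i arr) _ _ hdd
            rwa [List.getD_eq_getElem arr 0 hm]
          · left; exact hm
        simp only [hj]
        rw [ih (i + 1 + runLen (List.drop (i + 1) arr) + 1) _ (by omega)]
        rw [hraw, conv_cons, hskip]
        by_cases hc : 2 ≤ runLen (List.drop (i + 1) arr)
        · rw [if_pos (by omega : i + 1 + runLen (List.drop (i + 1) arr) - (i + 1) > 1),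
            if_pos (by simp; omega)]
          simp only [List.append_assoc]
          congr 2
          simp only [List.cons.injEq, and_true]
          constructor <;> omega
        · rw [if_neg (by omega : ¬ i + 1 + runLen (List.drop (i + 1) arr) - (i + 1) > 1),
            if_neg (by simp; omega)]
          simp
      · rw [if_neg hv]
        rw [ih (i + 1) ranges (by omega)]
        rw [rawRuns_skip arr i (Or.inr hv)]
    · rw [if_neg hi]
      rw [List.drop_eq_nil_of_le (by omega), rawRuns_nil]
      simp [conv]

lemma func_eq_raw (arr : List Int) : func arr = conv (rawRuns arr 0) := by
  rw [func, funcGo_eq arr arr.length 0 [] (by omega)]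
  simp

def closeRuns (st : List (Nat × Nat) × Option Nat) (n : Nat) : List (Nat × Nat) :=
  match st.2 with
  | none => st.1
  | some s0 => st.1 ++ [(s0, n - 1)]

lemma bFold_eq : ∀ (l : List Int) (n : Nat) (runs : List (Nat × Nat)) (s : Option Nat),
    closeRuns ((enumFrom n l).foldl bStep (runs, s)) (n + l.length)
      = runs ++ (match s with
        | none => rawRuns l n
        | some s0 => (s0, n + runLen l - 1) :: rawRuns (List.drop (runLen l) l) (n + runLen l)) := by
  intro l
  induction l with
  | nil =>
    intro n runs s
    cases s <;> simp [enumFrom, closeRuns, rawRuns_nil, runLen]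
  | cons v t ih =>
    intro n runs s
    by_cases hv : v > 10
    · cases s with
      | none =>
        simp only [enumFrom, List.foldl_cons, bStep, if_pos hv]
        rw [show n + (v :: t).length = (n + 1) + t.length by simp; omega]
        rw [ih (n + 1) runs (some n)]
        rw [rawRuns, if_pos hv, runLen_cons_pos _ hv, Nat.add_sub_cancel,
          show n + 1 + runLen t - 1 = n + (runLen t + 1) - 1 by omega,
          show n + 1 + runLen t = n + (runLen t + 1) by omega]
      | some s0 =>
        simp only [enumFrom, List.foldl_cons, bStep, if_pos hv]
        rw [show n + (v :: t).length = (n + 1) + t.length by simp; omega]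
        rw [ih (n + 1) runs (some s0)]
        rw [runLen_cons_pos _ hv, List.drop_succ_cons,
          show n + 1 + runLen t - 1 = n + (runLen t + 1) - 1 by omega,
          show n + 1 + runLen t = n + (runLen t + 1) by omega]
    · cases s with
      | none =>
        simp only [enumFrom, List.foldl_cons, bStep, if_neg hv]
        rw [show n + (v :: t).length = (n + 1) + t.length by simp; omega]
        rw [ih (n + 1) runs none, rawRuns_cons_neg _ _ hv]
      | some s0 =>
        simp only [enumFrom, List.foldl_cons, bStep, if_neg hv]
        rw [show n + (v :: t).length = (n + 1) + t.length by simp; omega]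
        rw [ih (n + 1) (runs ++ [(s0, n - 1)]) none]
        rw [runLen_cons_neg _ hv, List.drop_zero, rawRuns_cons_neg _ _ hv]
        simp

lemma func_alt_eq_raw (arr : List Int) : func_alt arr = conv (rawRuns arr 0) := by
  have h := bFold_eq arr 0 [] none
  simp only [List.nil_append] at h
  show conv (closeRuns ((enumFrom 0 arr).foldl bStep ([], none)) arr.length) = _
  rw [show arr.length = 0 + arr.length from (Nat.zero_add _).symm, h]

-- ===== VERDICT (by name: the statement is the Claim_ definition above) =====
theorem func_spec : Claim_equal_func := by
  intro arr _
  unfold Spec_func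
  rw [func_eq_raw, func_alt_eq_raw]
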